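-- pv_equiv track=rewrite | github.com/EricChagoya/Search-Engine | merge.py | same_word
-- ===== SOURCE A (Python) =====
-- def same_word(tokens:['str']) -> str and [int]:
--     """It sees what word appears first. If multiple files share
--     the same first word, then return a list of their indexes"""
--     first = "{"
--     similar_index = []
--     for n, token in enumerate(tokens):
--         if token == first:
--             similar_index.append(n)
--         elif token < first:
--             first= token
--             similar_index = [n]
--     return first, similar_index
-- ===== SOURCE B (Python) =====
-- def same_word(tokens):
--     """It sees what word appears first. If multiple files share
--     the same first word, then return a list of their indexes"""
--     first = min(["{"] + tokens)
--     similar_index = [n for n, token in enumerate(tokens) if token == first]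
--     return first, similar_index
-- ===== Notes on version B (the rewrite author's own statement) =====
-- stated objective: simpler
-- what changed: Replaces A's fused single pass that tracks the running minimum and resets/extends an index list by a two-pass decomposition: compute the winner as the minimum of the tokens together with the sentinel, then collect its indexes with one comprehension.
import Mathlib
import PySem

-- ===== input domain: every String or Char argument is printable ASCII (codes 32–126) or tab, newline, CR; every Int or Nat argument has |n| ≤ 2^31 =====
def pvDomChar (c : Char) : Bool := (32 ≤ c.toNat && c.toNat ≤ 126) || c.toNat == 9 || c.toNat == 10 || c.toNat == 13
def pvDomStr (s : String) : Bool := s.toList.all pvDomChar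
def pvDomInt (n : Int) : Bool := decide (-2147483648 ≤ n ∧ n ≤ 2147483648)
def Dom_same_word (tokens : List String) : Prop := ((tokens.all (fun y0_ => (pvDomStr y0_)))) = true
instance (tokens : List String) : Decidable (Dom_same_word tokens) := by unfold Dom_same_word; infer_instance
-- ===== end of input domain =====

-- B computes the winning word as the minimum of the sentinel-seeded token list and then collects
-- second pass, replacing A's fused min-tracking/list-resetting single loop (objective: simpler).

-- ===== PORT A =====
-- A: one pass over enumerate(tokens) with state (first, similar_index).
def same_word (tokens : List String) : String × List Int :=
  (PySem.List.enumerate tokens 0).foldl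
    (fun st p =>
      if p.2 == st.1 then (st.1, st.2 ++ [p.1])
      else if p.2 < st.1 then (p.2, [p.1])
      else st)
    ("{", [])

-- ===== PORT B =====
-- B: first = min(["{"] ++ tokens) (nonempty, so min? is some), then one comprehension.
def same_word_alt (tokens : List String) : String × List Int :=
  let first := (PySem.List.min? ("{" :: tokens) (fun y => y)).getD "{"
  (first, (PySem.List.enumerate tokens 0).filterMap
            (fun p => if p.2 == first then some p.1 else none))

-- ===== PRECONDITION & SPEC =====
def Spec_same_word (tokens : List String) (out : String × List Int) : Prop := out = same_word_alt tokens
instance (tokens : List String) (out : String × List Int) : Decidable (Spec_same_word tokens out) := by unfold Spec_same_word; infer_instance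

-- ===== CLAIM (what is proved, stated in full; the proofs are below) =====
def Claim_equal_same_word : Prop := ∀ (tokens : List String), Dom_same_word tokens → Spec_same_word tokens (same_word tokens)

-- ===== LEMMAS AND PROOFS =====

theorem foldl_min_le (ts : List String) (f : String) : ts.foldl min f ≤ f := by
  induction ts generalizing f with
  | nil => exact le_refl f
  | cons t ts ih =>
    simp only [List.foldl_cons]
    exact le_trans (ih (min f t)) (min_le_left f t)

-- the main invariant: A's loop from state (f, idxs) at start index n
theorem same_word_loop (ts : List String) (n : Int) (f : String) (idxs : List Int) :
    (PySem.List.enumerate ts n).foldl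
      (fun st p =>
        if p.2 == st.1 then (st.1, st.2 ++ [p.1])
        else if p.2 < st.1 then (p.2, [p.1])
        else st)
      (f, idxs)
    = (ts.foldl min f,
       (if ts.foldl min f = f then idxs else []) ++
         (PySem.List.enumerate ts n).filterMap
           (fun p => if p.2 == ts.foldl min f then some p.1 else none)) := by
  induction ts generalizing n f idxs with
  | nil => simp [PySem.List.enumerate_nil]
  | cons t ts ih =>
    simp only [PySem.List.enumerate_cons, List.foldl_cons]
    by_cases ht : t = f
    · have hstep : (if (t == f) = true then (f, idxs ++ [n]) else if t < f then (t, [n]) else (f, idxs)) = (f, idxs ++ [n]) := by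
        simp [ht]
      have hmin : min f t = f := by rw [ht, min_self]
      rw [hstep, ih (n + 1) f (idxs ++ [n])]
      simp only [hmin]
      rw [List.filterMap_cons]
      by_cases hm : ts.foldl min f = f
      · simp [hm, ht, List.append_assoc]
      · have hle : ts.foldl min f ≤ f := foldl_min_le ts f
        have hlt2 : ts.foldl min f < f := lt_of_le_of_ne hle hm
        have htm : ¬ (t == ts.foldl min f) = true := by
          simp only [beq_iff_eq]; rw [ht]; exact fun h => absurd h.symm (ne_of_lt hlt2)
        simp [hm, htm]
    · by_cases hlt : t < f
      · have hstep : (if (t == f) = true then (f, idxs ++ [n]) else if t < f then (t, [n]) else (f, idxs)) = (t, [n]) := by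
          simp [ht, hlt]
        have hmin : min f t = t := min_eq_right (le_of_lt hlt)
        rw [hstep, ih (n + 1) t [n]]
        simp only [hmin]
        have hle : ts.foldl min t ≤ t := foldl_min_le ts t
        have hmf : ts.foldl min t ≠ f := ne_of_lt (lt_of_le_of_lt hle hlt)
        rw [List.filterMap_cons]
        by_cases hmt : ts.foldl min t = t
        · simp [hmt, ht]
        · have htm : ¬ (t == ts.foldl min t) = true := by
            simp only [beq_iff_eq]; exact fun h => absurd h.symm hmt
          simp [hmt, hmf, htm]
      · have hstep : (if (t == f) = true then (f, idxs ++ [n]) else if t < f then (t, [n]) else (f, idxs)) = (f, idxs) := by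
          simp [ht, hlt]
        have hft : f < t := lt_of_le_of_ne (not_lt.mp hlt) (Ne.symm ht)
        have hmin : min f t = f := min_eq_left (le_of_lt hft)
        rw [hstep, ih (n + 1) f idxs]
        simp only [hmin]
        have hle : ts.foldl min f ≤ f := foldl_min_le ts f
        have htm : ¬ (t == ts.foldl min f) = true := by
          simp only [beq_iff_eq]
          exact fun h => absurd h.symm (ne_of_lt (lt_of_le_of_lt hle hft))
        rw [List.filterMap_cons]
        simp [htm]

theorem same_word_spec : Claim_equal_same_word := by
  intro tokens _
  unfold Spec_same_word same_word same_word_alt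
  rw [same_word_loop tokens 0 "{" [], PySem.List.min?_id_cons]
  simp
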